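-- pv_equiv track=rewrite | github.com/pabloschwarzenberg/grader | tema11_ej2/tema11_ej2_dcac3bcb06d73e61df7ab743bff6943b.py | validar_expresion
-- ===== SOURCE A (Python) =====
-- def validar_expresion(expresion):
--     expresion = list(expresion)
--     a=len(expresion)
--     if expresion[a-1] == '-' or expresion[a-1] == '+':
--         return False
--     elif expresion[0] == '+' or expresion[0] == '-':
--         if expresion[1] == '+' or expresion[1] == '-':
--             return False
--         else:
--             return validar_expresion(expresion[1:])
--     elif len(expresion) == 1:
--             return True
--     elif expresion[0] != '+' and expresion[0] != '-':
--         return validar_expresion(expresion[1:a])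
-- ===== SOURCE B (Python) =====
-- def validar_expresion(expresion):
--     if expresion[-1] in '+-':
--         return False
--     return all(not (a in '+-' and b in '+-')
--                for a, b in zip(expresion, expresion[1:]))
-- ===== Notes on version B (the rewrite author's own statement) =====
-- stated objective: faster
-- what changed: Replaced A's recursion that re-slices the string and re-checks the last character at every step with a single linear pass over adjacent character pairs plus one boundary check.
import Mathlib
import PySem

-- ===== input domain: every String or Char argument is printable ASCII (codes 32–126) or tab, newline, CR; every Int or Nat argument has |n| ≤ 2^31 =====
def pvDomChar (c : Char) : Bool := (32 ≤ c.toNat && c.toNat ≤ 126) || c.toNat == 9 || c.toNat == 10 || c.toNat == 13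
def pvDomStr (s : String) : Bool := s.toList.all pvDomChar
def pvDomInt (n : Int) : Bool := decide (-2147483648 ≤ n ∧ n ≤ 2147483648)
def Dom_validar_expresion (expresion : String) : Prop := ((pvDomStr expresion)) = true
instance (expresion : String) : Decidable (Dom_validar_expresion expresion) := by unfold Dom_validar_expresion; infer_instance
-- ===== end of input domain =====

-- B replaces A's quadratic recursion (re-slicing and re-checking the last char each step)
-- by one linear pass over adjacent pairs plus a single last-char check.

-- ===== PORT A =====
-- literal transliteration of A's recursion on the character list; the [] case is
-- unreachable under Pre_ (Python raises IndexError on '')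
def validar_expresion_core : List Char → Bool
  | [] => false
  | c :: rest =>
    let last := (c :: rest).getLast (by simp)
    if last = '-' ∨ last = '+' then false
    else if c = '+' ∨ c = '-' then
      -- expresion[1]: when this branch is reached rest is nonempty (else last = c would be a sign);
      -- the [] arm mirrors Python's IndexError, unreachable
      match rest with
      | [] => false
      | d :: rest' =>
        if d = '+' ∨ d = '-' then false
        else validar_expresion_core (d :: rest')
    else if (c :: rest).length = 1 then true
    else validar_expresion_core rest

def validar_expresion (expresion : String) : Bool :=
  validar_expresion_core expresion.toList

-- ===== PORT B =====
def pvIsSign (c : Char) : Bool := c = '+' || c = '-'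

-- all(not (a in '+-' and b in '+-') for a,b in zip(s, s[1:]))
def pvPairsOK : List Char → Bool
  | a :: b :: rest => !(pvIsSign a && pvIsSign b) && pvPairsOK (b :: rest)
  | _ => true

def validar_expresion_alt (expresion : String) : Bool :=
  match expresion.toList.getLast? with
  | none => false   -- unreachable under Pre_: Python B raises IndexError on ''
  | some l => if pvIsSign l then false else pvPairsOK expresion.toList

-- ===== PRECONDITION & SPEC =====
-- Pre_ excludes only the empty string, on which both A and B raise IndexError.
def Pre_validar_expresion (expresion : String) : Prop := expresion ≠ ""
instance (expresion : String) : Decidable (Pre_validar_expresion expresion) := by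
  unfold Pre_validar_expresion; infer_instance

def pvWitness_validar_expresion : String := "a+b"

def Spec_validar_expresion (expresion : String) (out : Bool) : Prop := out = validar_expresion_alt expresion
instance (expresion : String) (out : Bool) : Decidable (Spec_validar_expresion expresion out) := by unfold Spec_validar_expresion; infer_instance

-- ===== CLAIM (what is proved, stated in full; the proofs are below) =====
def Claim_equal_validar_expresion : Prop := ∀ (expresion : String), Dom_validar_expresion expresion → Pre_validar_expresion expresion → Spec_validar_expresion expresion (validar_expresion expresion)

-- ===== LEMMAS AND PROOFS =====

-- B's body on a raw character list
def pvAltCore (cs : List Char) : Bool :=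
  match cs.getLast? with
  | none => false
  | some l => if pvIsSign l then false else pvPairsOK cs

lemma pvIsSign_iff (c : Char) : pvIsSign c = true ↔ c = '+' ∨ c = '-' := by
  simp [pvIsSign]

lemma core_eq_altCore : ∀ (cs : List Char), cs ≠ [] →
    validar_expresion_core cs = pvAltCore cs := by
  intro cs
  induction cs with
  | nil => intro h; exact absurd rfl h
  | cons c rest ih =>
    intro _
    cases rest with
    | nil =>
      by_cases h : c = '+' ∨ c = '-' <;>
        simp [validar_expresion_core, pvAltCore, pvPairsOK, pvIsSign_iff, h] <;>
        tauto
    | cons d rest' =>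
      have hne : (d :: rest') ≠ ([] : List Char) := by simp
      have ih' := ih hne
      have hlast : (c :: d :: rest').getLast (by simp) = (d :: rest').getLast hne := by
        simp [List.getLast]
      have hL? : (d :: rest').getLast? = some ((d :: rest').getLast hne) :=
        List.getLast?_eq_some_getLast hne
      have hlast? : (c :: d :: rest').getLast? = (d :: rest').getLast? := by
        simp [List.getLast?_cons_cons]
      by_cases hL : (d :: rest').getLast hne = '-' ∨ (d :: rest').getLast hne = '+'
      · -- last char is a sign: both sides return false
        have hLs : pvIsSign ((d :: rest').getLast hne) = true := by
          rw [pvIsSign_iff]; tauto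
        simp [validar_expresion_core, pvAltCore, hlast, hL, hlast?, hL?, hLs]
      · have hLs : pvIsSign ((d :: rest').getLast hne) = false := by
          rw [Bool.eq_false_iff]; rw [Ne, pvIsSign_iff]; tauto
        have haltTail : pvAltCore (d :: rest') = pvPairsOK (d :: rest') := by
          simp [pvAltCore, hL?, hLs]
        by_cases hc : c = '+' ∨ c = '-'
        · by_cases hd : d = '+' ∨ d = '-'
          · -- two adjacent signs at the front: both sides return false
            have hc' : pvIsSign c = true := by rw [pvIsSign_iff]; tauto
            have hd' : pvIsSign d = true := by rw [pvIsSign_iff]; tauto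
            simp [validar_expresion_core, pvAltCore, hlast, hL, hd, hc,
              hlast?, hL?, hLs, pvPairsOK, hc', hd']
          · have hd' : pvIsSign d = false := by
              rw [Bool.eq_false_iff]; rw [Ne, pvIsSign_iff]; tauto
            have hstep : validar_expresion_core (c :: d :: rest') = validar_expresion_core (d :: rest') := by
              simp [validar_expresion_core, hlast, hL, hc, hd]
            rw [hstep, ih', haltTail]
            simp [pvAltCore, hlast?, hL?, hLs, pvPairsOK, hd']
        · have hc' : pvIsSign c = false := by
            rw [Bool.eq_false_iff]; rw [Ne, pvIsSign_iff]; tauto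
          have hstep : validar_expresion_core (c :: d :: rest') = validar_expresion_core (d :: rest') := by
            simp [validar_expresion_core, hlast, hL, hc]
          rw [hstep, ih', haltTail]
          simp [pvAltCore, hlast?, hL?, hLs, pvPairsOK, hc']

lemma toList_ne_nil_of_ne_empty (s : String) (h : s ≠ "") : s.toList ≠ [] := by
  simpa using h

-- ===== VERDICT (by name: the statement is the Claim_ definition above) =====
theorem validar_expresion_spec : Claim_equal_validar_expresion := by
  intro s _ hpre
  unfold Spec_validar_expresion validar_expresion validar_expresion_alt
  rw [core_eq_altCore s.toList (toList_ne_nil_of_ne_empty s hpre)]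
  rfl
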